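-- pv_equiv track=rewrite | github.com/ehartford/RYS | hf_export/common.py | detect_text_layer_prefix
-- ===== SOURCE A (Python) =====
-- TEXT_LAYER_PREFIX_CANDIDATES = (
--     "language_model.model.layers.",
--     "model.language_model.layers.",
--     "model.layers.",
--     "language_model.layers.",
-- )
--
-- def detect_text_layer_prefix(weight_map: dict[str, str]) -> str:
--     for prefix in TEXT_LAYER_PREFIX_CANDIDATES:
--         if any(key.startswith(prefix) for key in weight_map):
--             return prefix
--     raise ValueError(
--         "Could not detect decoder layer prefix in model.safetensors.index.json. "
--         f"Tried: {', '.join(TEXT_LAYER_PREFIX_CANDIDATES)}"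
--     )
-- ===== SOURCE B (Python) =====
-- TEXT_LAYER_PREFIX_CANDIDATES = (
--     "language_model.model.layers.",
--     "model.language_model.layers.",
--     "model.layers.",
--     "language_model.layers.",
-- )
--
-- def detect_text_layer_prefix(weight_map: dict[str, str]) -> str:
--     # Single pass over the keys: for each key take the index of the first
--     # candidate prefix it starts with (or n if none), keep the running minimum.
--     n = len(TEXT_LAYER_PREFIX_CANDIDATES)
--     best = n
--     for key in weight_map:
--         m = next((i for i, p in enumerate(TEXT_LAYER_PREFIX_CANDIDATES)
--                   if key.startswith(p)), n)
--         if m < best: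
--             best = m
--     if best < n:
--         return TEXT_LAYER_PREFIX_CANDIDATES[best]
--     raise ValueError(
--         "Could not detect decoder layer prefix in model.safetensors.index.json. "
--         f"Tried: {', '.join(TEXT_LAYER_PREFIX_CANDIDATES)}"
--     )
-- ===== Notes on version B (the rewrite author's own statement) =====
-- stated objective: alternative
-- what changed: Instead of scanning all keys once per candidate prefix (outer loop over prefixes), B makes a single pass over the keys, computing for each key the index of the first candidate it matches and keeping the running minimum index; the minimum index equals the first prefix any key matches, so priority order is preserved.
import Mathlib
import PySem

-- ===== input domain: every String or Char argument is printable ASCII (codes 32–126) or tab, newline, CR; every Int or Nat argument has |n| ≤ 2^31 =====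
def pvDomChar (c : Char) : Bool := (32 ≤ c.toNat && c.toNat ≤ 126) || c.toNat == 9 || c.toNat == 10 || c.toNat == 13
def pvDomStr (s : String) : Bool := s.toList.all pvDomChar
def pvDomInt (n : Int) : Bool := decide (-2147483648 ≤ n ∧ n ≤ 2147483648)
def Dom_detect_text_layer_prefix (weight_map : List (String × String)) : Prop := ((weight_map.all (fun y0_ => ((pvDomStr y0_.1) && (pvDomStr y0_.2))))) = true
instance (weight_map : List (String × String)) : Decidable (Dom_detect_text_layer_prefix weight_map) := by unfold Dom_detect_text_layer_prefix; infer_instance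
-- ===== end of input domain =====

-- B differs only in decomposition: one pass over the keys with a running minimum
-- candidate index, instead of one scan of all keys per candidate prefix.

def pvCands : List String :=
  ["language_model.model.layers.", "model.language_model.layers.",
   "model.layers.", "language_model.layers."]

-- ===== PORT A =====
-- for prefix in CANDIDATES: if any(key.startswith(prefix) for key in weight_map): return prefix
-- (the final `raise ValueError` is outside Pre_; the port returns "" there)
def pvGoA (keys : List String) : List String → Option String
  | [] => none
  | p :: rest =>
      if keys.any (fun k => PySem.Str.startswith k p) then some p else pvGoA keys rest

def detect_text_layer_prefix (weight_map : List (String × String)) : String :=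
  (pvGoA (weight_map.map Prod.fst) pvCands).getD ""

-- ===== PORT B =====
-- index of the first candidate `k` starts with; returns the list length if none
def pvFirstIdx (k : String) : List String → Nat
  | [] => 0
  | p :: rest => if PySem.Str.startswith k p then 0 else pvFirstIdx k rest + 1

-- single pass over the keys keeping the running minimum index (init = n);
-- the `raise ValueError` branch is outside Pre_; the port returns "" there
def detect_text_layer_prefix_alt (weight_map : List (String × String)) : String :=
  let best := (weight_map.map Prod.fst).foldl
      (fun b k => min b (pvFirstIdx k pvCands)) pvCands.length
  pvCands.getD best ""

-- ===== PRECONDITION & SPEC =====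
-- Pre_ excludes exactly the inputs on which A raises ValueError: weight maps
-- none of whose keys starts with any candidate prefix (B raises there too).
def Pre_detect_text_layer_prefix (weight_map : List (String × String)) : Prop :=
  (pvCands.any (fun p => weight_map.any (fun kv => PySem.Str.startswith kv.1 p))) = true

instance (weight_map : List (String × String)) : Decidable (Pre_detect_text_layer_prefix weight_map) := by
  unfold Pre_detect_text_layer_prefix; infer_instance

def pvWitness_detect_text_layer_prefix : (List (String × String)) :=
  [("model.layers.0.self_attn.q_proj.weight", "model-00001.safetensors")]

def Spec_detect_text_layer_prefix (weight_map : List (String × String)) (out : String) : Prop := out = detect_text_layer_prefix_alt weight_map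
instance (weight_map : List (String × String)) (out : String) : Decidable (Spec_detect_text_layer_prefix weight_map out) := by unfold Spec_detect_text_layer_prefix; infer_instance

-- ===== CLAIM (what is proved, stated in full; the proofs are below) =====
def Claim_equal_detect_text_layer_prefix : Prop := ∀ (weight_map : List (String × String)), Dom_detect_text_layer_prefix weight_map → Pre_detect_text_layer_prefix weight_map → Spec_detect_text_layer_prefix weight_map (detect_text_layer_prefix weight_map)

-- ===== LEMMAS AND PROOFS =====

-- index of the first candidate that ANY key starts with (length if none)
def pvFirstIdxAny (keys : List String) : List String → Nat
  | [] => 0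
  | p :: rest =>
      if keys.any (fun k => PySem.Str.startswith k p) then 0
      else pvFirstIdxAny keys rest + 1

-- A's result is the candidate at that index (getD "" covers the no-match case)
theorem pvGoA_getD (cands keys : List String) :
    (pvGoA keys cands).getD "" = cands.getD (pvFirstIdxAny keys cands) "" := by
  induction cands with
  | nil => simp [pvGoA, pvFirstIdxAny]
  | cons p rest ih =>
      simp only [pvGoA, pvFirstIdxAny]
      split
      · simp
      · simpa using ih

-- foldl-min is bounded by its initial value
theorem pvFold_le_init (f : String → Nat) (keys : List String) (b : Nat) :
    keys.foldl (fun b k => min b (f k)) b ≤ b := by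
  induction keys generalizing b with
  | nil => simp
  | cons k ks ih => exact le_trans (ih _) (Nat.min_le_left _ _)

-- foldl-min is bounded by every element's value
theorem pvFold_le_mem (f : String → Nat) (keys : List String) (b : Nat)
    (k : String) (hk : k ∈ keys) :
    keys.foldl (fun b k => min b (f k)) b ≤ f k := by
  induction keys generalizing b with
  | nil => cases hk
  | cons k' ks ih =>
      simp only [List.foldl_cons]
      rcases List.mem_cons.mp hk with h | h
      · subst h
        exact le_trans (pvFold_le_init f ks _) (Nat.min_le_right _ _)
      · exact ih (min b (f k')) h

-- foldl-min commutes with +1 on all inputs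
theorem pvFold_succ (f : String → Nat) (keys : List String) (b : Nat) :
    keys.foldl (fun b k => min b (f k + 1)) (b + 1)
      = keys.foldl (fun b k => min b (f k)) b + 1 := by
  induction keys generalizing b with
  | nil => simp
  | cons k ks ih =>
      simp only [List.foldl_cons]
      rw [show min (b + 1) (f k + 1) = min b (f k) + 1 by omega]
      exact ih _

-- B's running minimum equals the index of the first candidate any key matches
theorem pvFold_eq_firstIdxAny (cands keys : List String) :
    keys.foldl (fun b k => min b (pvFirstIdx k cands)) cands.length
      = pvFirstIdxAny keys cands := by
  induction cands with
  | nil =>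
      simp only [pvFirstIdxAny, List.length_nil]
      simpa using pvFold_le_init (fun k => pvFirstIdx k []) keys 0
  | cons p rest ih =>
      simp only [pvFirstIdxAny, List.length_cons]
      by_cases h : keys.any (fun k => PySem.Str.startswith k p) = true
      · simp only [h, if_true]
        rcases List.any_eq_true.mp h with ⟨k, hk, hs⟩
        have hle := pvFold_le_mem (fun k => pvFirstIdx k (p :: rest)) keys
          (rest.length + 1) k hk
        simp only at hle
        have h0 : pvFirstIdx k (p :: rest) = 0 := by
          simp only [pvFirstIdx]; rw [if_pos (by simpa using hs)]
        omega
      · simp only [h]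
        have hall : ∀ k ∈ keys, pvFirstIdx k (p :: rest) = pvFirstIdx k rest + 1 := by
          intro k hk
          have : PySem.Str.startswith k p ≠ true := fun hs =>
            h (List.any_eq_true.mpr ⟨k, hk, hs⟩)
          simp only [pvFirstIdx]; rw [if_neg (by simpa using this)]
        calc keys.foldl (fun b k => min b (pvFirstIdx k (p :: rest))) (rest.length + 1)
            = keys.foldl (fun b k => min b (pvFirstIdx k rest + 1)) (rest.length + 1) := by
              apply PySem.List.foldl_congr_mem
              intro b k hk; rw [hall k hk]
          _ = keys.foldl (fun b k => min b (pvFirstIdx k rest)) rest.length + 1 := pvFold_succ _ _ _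
          _ = pvFirstIdxAny keys rest + 1 := by rw [ih]

-- ===== VERDICT (by name: the statement is the Claim_ definition above) =====
theorem detect_text_layer_prefix_spec : Claim_equal_detect_text_layer_prefix := by
  intro wm _ _
  unfold Spec_detect_text_layer_prefix detect_text_layer_prefix detect_text_layer_prefix_alt
  rw [pvGoA_getD, pvFold_eq_firstIdxAny]
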